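-- pv_equiv track=rewrite | github.com/PICOM-AI/NeuroSymbolicNavigation | solver/pgm2asp-scale.py | scale_down_grid
-- ===== SOURCE A (Python) =====
-- from typing import Tuple, List
--
-- def block_is_wall(block: List[int], occ_thresh: int, unknown_as_wall: bool, invert: bool, maxval: int) -> bool:
--     scale = 255 / maxval
--     for val in block:
--         pix = int(val * scale + 0.5)
--         if invert:
--             pix = 255 - pix
--         if pix <= occ_thresh:
--             return True
--         if 250 > pix > occ_thresh and unknown_as_wall:
--             return True
--     return False
--
-- def scale_down_grid(w: int, h: int, data: List[int], scale_factor: int, occ_thresh: int, unknown_as_wall: bool, invert: bool, maxval: int):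
--     new_w = w // scale_factor
--     new_h = h // scale_factor
--     walls = set()
--     free = []
--     for j in range(new_h):  # top to bottom
--         for i in range(new_w):  # left to right
--             block = []
--             for dy in range(scale_factor):
--                 for dx in range(scale_factor):
--                     src_x = i * scale_factor + dx
--                     src_y = j * scale_factor + dy
--                     if src_x < w and src_y < h:
--                         block.append(data[src_y * w + src_x])
--             if block_is_wall(block, occ_thresh, unknown_as_wall, invert, maxval):
--                 walls.add((i + 1, j + 1))  # top-left origin, 1-based
--             else:
--                 free.append((i + 1, j + 1))
--     return new_w, new_h, walls, free
-- ===== SOURCE B (Python) =====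
-- from typing import List
--
-- def scale_down_grid(w: int, h: int, data: List[int], scale_factor: int, occ_thresh: int, unknown_as_wall: bool, invert: bool, maxval: int):
--     new_w = w // scale_factor
--     new_h = h // scale_factor
--     walls = set()
--     free = []
--     if new_w > 0 and new_h > 0:
--         scale = 255 / maxval
--         # one flat pixel pass marking wall blocks in a boolean table
--         mark = [False] * (new_w * new_h)
--         for src_y in range(new_h * scale_factor):
--             row = src_y * w
--             for src_x in range(new_w * scale_factor):
--                 pix = int(data[row + src_x] * scale + 0.5)
--                 if invert:
--                     pix = 255 - pix
--                 if pix <= occ_thresh or (occ_thresh < pix < 250 and unknown_as_wall):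
--                     mark[(src_y // scale_factor) * new_w + src_x // scale_factor] = True
--         # one pass over blocks emitting walls / free in row-major order
--         for j in range(new_h):
--             for i in range(new_w):
--                 if mark[j * new_w + i]:
--                     walls.add((i + 1, j + 1))
--                 else:
--                     free.append((i + 1, j + 1))
--     return new_w, new_h, walls, free
-- ===== Notes on version B (the rewrite author's own statement) =====
-- stated objective: alternative
-- what changed: A gathers each block's pixels with four nested loops and classifies it via a helper with early return; B makes one flat pass over the source pixels marking wall blocks in a boolean table indexed by block, then one pass over blocks emitting walls and free.
import Mathlib
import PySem

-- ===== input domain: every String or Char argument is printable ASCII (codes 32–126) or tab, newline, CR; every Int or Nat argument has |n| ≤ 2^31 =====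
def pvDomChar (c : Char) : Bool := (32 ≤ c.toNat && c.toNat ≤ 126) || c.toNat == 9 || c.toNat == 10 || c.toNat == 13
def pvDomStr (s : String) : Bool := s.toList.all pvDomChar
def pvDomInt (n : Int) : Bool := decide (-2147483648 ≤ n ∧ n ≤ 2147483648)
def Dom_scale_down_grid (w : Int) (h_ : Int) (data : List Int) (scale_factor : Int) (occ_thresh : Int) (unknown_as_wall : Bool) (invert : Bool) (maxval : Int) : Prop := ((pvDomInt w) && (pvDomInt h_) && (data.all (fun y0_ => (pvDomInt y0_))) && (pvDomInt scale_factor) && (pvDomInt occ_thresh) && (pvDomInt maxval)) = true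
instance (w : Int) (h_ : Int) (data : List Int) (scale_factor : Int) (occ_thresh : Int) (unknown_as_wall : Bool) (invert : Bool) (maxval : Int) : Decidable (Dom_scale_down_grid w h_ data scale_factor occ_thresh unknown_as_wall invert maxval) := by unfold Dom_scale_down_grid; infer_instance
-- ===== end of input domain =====

-- B replaces A's per-block pixel gathering (4 nested loops + early-exit helper) by one flat
-- pass over the source pixels marking wall blocks in a boolean table, then one block pass
-- emitting walls and free (objective: alternative decomposition, same exact results).
-- The helpers pvFroundPos … pvRawPix are an exact integer model of the binary64 (IEEE double)
-- arithmetic Python performs in 'int(val * (255 / maxval) + 0.5)'; both ports use it.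

def pvFroundPos (n d : Nat) : Nat × Int :=
  let e0 : Int := ((Nat.log2 n + 1 : Nat) : Int) - ((Nat.log2 d + 1 : Nat) : Int)
  let e : Int := if n * 2 ^ (-e0).toNat < d * 2 ^ e0.toNat then e0 - 1 else e0
  let s : Int := 52 - e
  let N := n * 2 ^ s.toNat
  let D := d * 2 ^ (-s).toNat
  let q := N / D
  let r := N % D
  let q' := if 2 * r > D ∨ (2 * r = D ∧ q % 2 = 1) then q + 1 else q
  if q' = 2 ^ 53 then (2 ^ 52, e + 1 - 52) else (q', e - 52)

def pvFround (num den : Int) : Int × Int :=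
  if num = 0 then (0, 0)
  else
    let mp := pvFroundPos num.natAbs den.natAbs
    (if (0 ≤ num) = (0 ≤ den) then (mp.1 : Int) else -(mp.1 : Int), mp.2)

def pvFmulInt (val m p : Int) : Int × Int :=
  if 0 ≤ p then pvFround (val * m * 2 ^ p.toNat) 1 else pvFround (val * m) (2 ^ (-p).toNat)

def pvFaddHalf (m p : Int) : Int × Int :=
  if -1 ≤ p then pvFround (m * 2 ^ (p + 1).toNat + 1) 2
  else pvFround (m + 2 ^ (-1 - p).toNat) (2 ^ (-p).toNat)

def pvFtrunc (m p : Int) : Int :=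
  if 0 ≤ p then m * 2 ^ p.toNat
  else if 0 ≤ m then ((m.toNat / 2 ^ (-p).toNat : Nat) : Int)
  else -((((-m).toNat / 2 ^ (-p).toNat : Nat)) : Int)

-- pix = int(val * scale + 0.5) with scale = 255 / maxval, exactly as binary64 evaluates it
def pvRawPix (val maxval : Int) : Int :=
  let s := pvFround 255 maxval
  let t := pvFmulInt val s.1 s.2
  let u := pvFaddHalf t.1 t.2
  pvFtrunc u.1 u.2

-- ===== PORT A =====
def block_is_wall (block : List Int) (occ_thresh : Int) (unknown_as_wall : Bool) (invert : Bool) (maxval : Int) : Bool :=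
  block.any (fun val =>
    let pix0 := pvRawPix val maxval
    let pix := if invert then 255 - pix0 else pix0
    decide (pix ≤ occ_thresh) || (decide (250 > pix) && decide (pix > occ_thresh) && unknown_as_wall))

def scale_down_grid (w : Int) (h_ : Int) (data : List Int) (scale_factor : Int) (occ_thresh : Int) (unknown_as_wall : Bool) (invert : Bool) (maxval : Int) : Int × Int × (List (Int × Int)) × (List (Int × Int)) :=
  let new_w := PySem.Int.floordiv w scale_factor
  let new_h := PySem.Int.floordiv h_ scale_factor
  let st :=
    (PySem.List.pyRange 0 new_h 1).foldl (fun st j =>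
      (PySem.List.pyRange 0 new_w 1).foldl (fun st i =>
        let block :=
          (PySem.List.pyRange 0 scale_factor 1).foldl (fun block dy =>
            (PySem.List.pyRange 0 scale_factor 1).foldl (fun block dx =>
              let src_x := i * scale_factor + dx
              let src_y := j * scale_factor + dy
              if src_x < w ∧ src_y < h_ then
                block ++ [PySem.List.pyGetD data (src_y * w + src_x) 0]
              else block) block) []
        if block_is_wall block occ_thresh unknown_as_wall invert maxval then
          (PySem.Set.add st.1 (i + 1, j + 1), st.2)
        else (st.1, st.2 ++ [(i + 1, j + 1)])) st)
      (([] : List (Int × Int)), ([] : List (Int × Int)))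
  (new_w, new_h, st.1, st.2)

-- ===== PORT B =====
def scale_down_grid_alt (w : Int) (h_ : Int) (data : List Int) (scale_factor : Int) (occ_thresh : Int) (unknown_as_wall : Bool) (invert : Bool) (maxval : Int) : Int × Int × (List (Int × Int)) × (List (Int × Int)) :=
  let new_w := PySem.Int.floordiv w scale_factor
  let new_h := PySem.Int.floordiv h_ scale_factor
  let st :=
    if 0 < new_w ∧ 0 < new_h then
      let mark0 := List.replicate (new_w * new_h).toNat false
      let mark :=
        (PySem.List.pyRange 0 (new_h * scale_factor) 1).foldl (fun mark src_y =>
          let row := src_y * w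
          (PySem.List.pyRange 0 (new_w * scale_factor) 1).foldl (fun mark src_x =>
            let pix0 := pvRawPix (PySem.List.pyGetD data (row + src_x) 0) maxval
            let pix := if invert then 255 - pix0 else pix0
            if decide (pix ≤ occ_thresh) || (decide (occ_thresh < pix) && decide (pix < 250) && unknown_as_wall) then
              PySem.List.pySetD mark (PySem.Int.floordiv src_y scale_factor * new_w + PySem.Int.floordiv src_x scale_factor) true
            else mark) mark) mark0
      (PySem.List.pyRange 0 new_h 1).foldl (fun st j =>
        (PySem.List.pyRange 0 new_w 1).foldl (fun st i =>
          if PySem.List.pyGetD mark (j * new_w + i) false then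
            (PySem.Set.add st.1 (i + 1, j + 1), st.2)
          else (st.1, st.2 ++ [(i + 1, j + 1)])) st)
        (([] : List (Int × Int)), ([] : List (Int × Int)))
    else ([], [])
  (new_w, new_h, st.1, st.2)

-- ===== PRECONDITION & SPEC =====
-- Pre_ excludes exactly the inputs where Python A raises: scale_factor = 0 (ZeroDivisionError
-- in w // scale_factor); and, when both downscaled dimensions are positive (so blocks are
-- processed), maxval = 0 (ZeroDivisionError in 255 / maxval) or, for positive scale_factor,
-- a data list too short for the largest accessed pixel index (IndexError).
def Pre_scale_down_grid (w : Int) (h_ : Int) (data : List Int) (scale_factor : Int) (occ_thresh : Int) (unknown_as_wall : Bool) (invert : Bool) (maxval : Int) : Prop :=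
  scale_factor ≠ 0 ∧
    ((0 < PySem.Int.floordiv w scale_factor ∧ 0 < PySem.Int.floordiv h_ scale_factor) →
      (maxval ≠ 0 ∧
        (0 < scale_factor →
          (PySem.Int.floordiv h_ scale_factor * scale_factor - 1) * w +
            PySem.Int.floordiv w scale_factor * scale_factor - 1 < (data.length : Int))))
instance (w : Int) (h_ : Int) (data : List Int) (scale_factor : Int) (occ_thresh : Int) (unknown_as_wall : Bool) (invert : Bool) (maxval : Int) : Decidable (Pre_scale_down_grid w h_ data scale_factor occ_thresh unknown_as_wall invert maxval) := by unfold Pre_scale_down_grid; infer_instance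

def pvWitness_scale_down_grid : Int × Int × List Int × Int × Int × Bool × Bool × Int :=
  (2, 2, [10, 200, 30, 255], 1, 50, false, false, 255)

def Spec_scale_down_grid (w : Int) (h_ : Int) (data : List Int) (scale_factor : Int) (occ_thresh : Int) (unknown_as_wall : Bool) (invert : Bool) (maxval : Int) (out : Int × Int × (List (Int × Int)) × (List (Int × Int))) : Prop := out = scale_down_grid_alt w h_ data scale_factor occ_thresh unknown_as_wall invert maxval
instance (w : Int) (h_ : Int) (data : List Int) (scale_factor : Int) (occ_thresh : Int) (unknown_as_wall : Bool) (invert : Bool) (maxval : Int) (out : Int × Int × (List (Int × Int)) × (List (Int × Int))) : Decidable (Spec_scale_down_grid w h_ data scale_factor occ_thresh unknown_as_wall invert maxval out) := by unfold Spec_scale_down_grid; infer_instance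

-- ===== CLAIM (what is proved, stated in full; the proofs are below) =====
def Claim_equal_scale_down_grid : Prop := ∀ (w : Int) (h_ : Int) (data : List Int) (scale_factor : Int) (occ_thresh : Int) (unknown_as_wall : Bool) (invert : Bool) (maxval : Int), Dom_scale_down_grid w h_ data scale_factor occ_thresh unknown_as_wall invert maxval → Pre_scale_down_grid w h_ data scale_factor occ_thresh unknown_as_wall invert maxval → Spec_scale_down_grid w h_ data scale_factor occ_thresh unknown_as_wall invert maxval (scale_down_grid w h_ data scale_factor occ_thresh unknown_as_wall invert maxval)

-- ===== LEMMAS AND PROOFS =====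

theorem pvWitness_ok :
    Dom_scale_down_grid (pvWitness_scale_down_grid.1) (pvWitness_scale_down_grid.2.1) (pvWitness_scale_down_grid.2.2.1) (pvWitness_scale_down_grid.2.2.2.1) (pvWitness_scale_down_grid.2.2.2.2.1) (pvWitness_scale_down_grid.2.2.2.2.2.1) (pvWitness_scale_down_grid.2.2.2.2.2.2.1) (pvWitness_scale_down_grid.2.2.2.2.2.2.2) ∧
    Pre_scale_down_grid (pvWitness_scale_down_grid.1) (pvWitness_scale_down_grid.2.1) (pvWitness_scale_down_grid.2.2.1) (pvWitness_scale_down_grid.2.2.2.1) (pvWitness_scale_down_grid.2.2.2.2.1) (pvWitness_scale_down_grid.2.2.2.2.2.1) (pvWitness_scale_down_grid.2.2.2.2.2.2.1) (pvWitness_scale_down_grid.2.2.2.2.2.2.2) := by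
  decide

-- the per-pixel test exactly as B writes it
def pixTest (occ_thresh : Int) (unknown_as_wall invert : Bool) (maxval val : Int) : Bool :=
  let pix0 := pvRawPix val maxval
  let pix := if invert then 255 - pix0 else pix0
  decide (pix ≤ occ_thresh) || (decide (occ_thresh < pix) && decide (pix < 250) && unknown_as_wall)

theorem bool_cond_swap (a b c : Prop) [Decidable a] [Decidable b] [Decidable c] (u : Bool) :
    (decide a || (decide b && decide c && u)) = (decide a || (decide c && decide b && u)) := by
  by_cases a <;> by_cases b <;> by_cases c <;> cases u <;> simp [*]

theorem block_is_wall_eq_any (block : List Int) (occ : Int) (uaw inv : Bool) (mv : Int) :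
    block_is_wall block occ uaw inv mv = block.any (pixTest occ uaw inv mv) := by
  unfold block_is_wall
  apply PySem.List.any_congr_mem
  intro x _
  simp only [pixTest, gt_iff_lt]
  exact bool_cond_swap _ _ _ _

theorem pyGetD_replicate_false (n : Nat) (k : Int) :
    PySem.List.pyGetD (List.replicate n false) k false = false := by
  by_cases h : PySem.Raise.InRange (List.replicate n false).length k
  · exact List.eq_of_mem_replicate (PySem.List.pyGetD_mem _ false h)
  · exact PySem.List.pyGetD_of_none _ _ _ ((PySem.List.pyGet?_eq_none_iff _ _).mpr h)

theorem quot_unique (nw a b c d : Int) (hb1 : 0 ≤ b) (hb2 : b < nw) (hd1 : 0 ≤ d) (hd2 : d < nw)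
    (h : a * nw + b = c * nw + d) : a = c ∧ b = d := by
  have e1 : (a * nw + b) % nw = b := by
    rw [show a * nw + b = b + nw * a from by ring, Int.add_mul_emod_self_left]
    exact Int.emod_eq_of_lt hb1 hb2
  have e2 : (c * nw + d) % nw = d := by
    rw [show c * nw + d = d + nw * c from by ring, Int.add_mul_emod_self_left]
    exact Int.emod_eq_of_lt hd1 hd2
  have hbd : b = d := by rw [← e1, h, e2]
  have hac : a * nw = c * nw := by linarith
  exact ⟨mul_right_cancel₀ (by omega : nw ≠ 0) hac, hbd⟩

theorem inner_len (L : List Int) (m : List Bool) (f : Int → Bool) (g : Int → Int) :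
    (L.foldl (fun m x => if f x then PySem.List.pySetD m (g x) true else m) m).length = m.length := by
  induction L generalizing m with
  | nil => rfl
  | cons x L ih =>
    simp only [List.foldl_cons]
    by_cases hf : f x
    · rw [if_pos hf, ih, PySem.List.length_pySetD]
    · rw [if_neg hf, ih]

theorem mark_row (L : List Int) (m : List Bool) (f : Int → Bool) (g : Int → Int) (k : Int)
    (hk : 0 ≤ k)
    (hg : ∀ x ∈ L, 0 ≤ g x ∧ g x < (m.length : Int)) :
    PySem.List.pyGetD (L.foldl (fun m x => if f x then PySem.List.pySetD m (g x) true else m) m) k false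
      = (PySem.List.pyGetD m k false || L.any (fun x => f x && decide (g x = k))) := by
  induction L generalizing m with
  | nil => simp
  | cons x L ih =>
    have hx := hg x List.mem_cons_self
    simp only [List.foldl_cons, List.any_cons]
    by_cases hf : f x
    · rw [if_pos hf]
      have hlen : ((PySem.List.pySetD m (g x) true).length : Int) = (m.length : Int) := by
        rw [PySem.List.length_pySetD]
      rw [ih (PySem.List.pySetD m (g x) true)
            (fun y hy => by rw [hlen]; exact hg y (List.mem_cons_of_mem _ hy))]
      have h1 : PySem.List.pyGetD (PySem.List.pySetD m (g x) true) k false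
          = if g x = k then true else PySem.List.pyGetD m k false := by
        rw [PySem.List.pySetD_of_nonneg m true hx.1,
            PySem.List.pyGetD_of_nonneg _ false hk,
            PySem.List.pyGetD_of_nonneg m false hk,
            List.getD_eq_getElem?_getD, List.getD_eq_getElem?_getD, List.getElem?_set]
        have hglen : (g x).toNat < m.length := by omega
        by_cases hq : g x = k
        · rw [if_pos (by omega : (g x).toNat = k.toNat), if_pos hglen, if_pos hq]
          rfl
        · rw [if_neg (by omega : ¬(g x).toNat = k.toNat), if_neg hq]
      rw [h1]
      by_cases hq : g x = k
      · simp [hq, hf]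
      · simp [hq, hf]
    · rw [if_neg hf, ih m (fun y hy => hg y (List.mem_cons_of_mem _ hy))]
      simp [hf]

theorem mark_outer (R : List Int) (L : List Int) (m : List Bool) (F : Int → Int → Bool)
    (G : Int → Int → Int) (k : Int) (hk : 0 ≤ k)
    (hg : ∀ y ∈ R, ∀ x ∈ L, 0 ≤ G y x ∧ G y x < (m.length : Int)) :
    PySem.List.pyGetD (R.foldl (fun m y => L.foldl (fun m x => if F y x then PySem.List.pySetD m (G y x) true else m) m) m) k false
      = (PySem.List.pyGetD m k false || R.any (fun y => L.any (fun x => F y x && decide (G y x = k)))) := by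
  induction R generalizing m with
  | nil => simp
  | cons y R ih =>
    simp only [List.foldl_cons, List.any_cons]
    have hlen1 : ((L.foldl (fun m x => if F y x then PySem.List.pySetD m (G y x) true else m) m).length : Int)
        = (m.length : Int) := by rw [inner_len]
    rw [ih (L.foldl (fun m x => if F y x then PySem.List.pySetD m (G y x) true else m) m)
          (fun y2 hy2 x hx => by rw [hlen1]; exact hg y2 (List.mem_cons_of_mem _ hy2) x hx)]
    rw [mark_row L m (F y) (G y) k hk (fun x hx => hg y List.mem_cons_self x hx)]
    rw [Bool.or_assoc]

-- A's gathered block over one (i, j) equals the plain dy/dx double scan (guards vacuous)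
theorem A_block (w h_ : Int) (data : List Int) (sf occ : Int) (uaw inv : Bool) (mv : Int)
    (nw nh i j : Int) (hsf : 0 < sf) (hi1 : 0 ≤ i) (hi2 : i < nw) (hj1 : 0 ≤ j) (hj2 : j < nh)
    (hw : nw * sf ≤ w) (hh : nh * sf ≤ h_) :
    block_is_wall
      ((PySem.List.pyRange 0 sf 1).foldl (fun block dy =>
        (PySem.List.pyRange 0 sf 1).foldl (fun block dx =>
          if i * sf + dx < w ∧ j * sf + dy < h_ then
            block ++ [PySem.List.pyGetD data ((j * sf + dy) * w + (i * sf + dx)) 0]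
          else block) block) []) occ uaw inv mv
    = (PySem.List.pyRange 0 sf 1).any (fun dy =>
        (PySem.List.pyRange 0 sf 1).any (fun dx =>
          pixTest occ uaw inv mv (PySem.List.pyGetD data ((j * sf + dy) * w + (i * sf + dx)) 0))) := by
  have hstep : ∀ (block : List Int), ∀ dy ∈ PySem.List.pyRange 0 sf 1,
      (PySem.List.pyRange 0 sf 1).foldl (fun block dx =>
          if i * sf + dx < w ∧ j * sf + dy < h_ then
            block ++ [PySem.List.pyGetD data ((j * sf + dy) * w + (i * sf + dx)) 0]
          else block) block
      = block ++ (PySem.List.pyRange 0 sf 1).map (fun dx =>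
          PySem.List.pyGetD data ((j * sf + dy) * w + (i * sf + dx)) 0) := by
    intro block dy hdy
    rw [PySem.List.mem_pyRange_one] at hdy
    calc (PySem.List.pyRange 0 sf 1).foldl (fun block dx =>
            if i * sf + dx < w ∧ j * sf + dy < h_ then
              block ++ [PySem.List.pyGetD data ((j * sf + dy) * w + (i * sf + dx)) 0]
            else block) block
        = (PySem.List.pyRange 0 sf 1).foldl (fun block dx =>
            block ++ [PySem.List.pyGetD data ((j * sf + dy) * w + (i * sf + dx)) 0]) block := by
          apply PySem.List.foldl_congr_mem
          intro acc dx hdx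
          rw [PySem.List.mem_pyRange_one] at hdx
          have h1 : (i + 1) * sf ≤ nw * sf := mul_le_mul_of_nonneg_right (by omega) (le_of_lt hsf)
          have h2 : (j + 1) * sf ≤ nh * sf := mul_le_mul_of_nonneg_right (by omega) (le_of_lt hsf)
          have hxw : i * sf + dx < w := by nlinarith
          have hyh : j * sf + dy < h_ := by nlinarith
          rw [if_pos ⟨hxw, hyh⟩]
      _ = block ++ (PySem.List.pyRange 0 sf 1).map (fun dx =>
            PySem.List.pyGetD data ((j * sf + dy) * w + (i * sf + dx)) 0) :=
          PySem.List.foldl_append_singleton_eq_map _ _ _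
  calc block_is_wall
        ((PySem.List.pyRange 0 sf 1).foldl (fun block dy =>
          (PySem.List.pyRange 0 sf 1).foldl (fun block dx =>
            if i * sf + dx < w ∧ j * sf + dy < h_ then
              block ++ [PySem.List.pyGetD data ((j * sf + dy) * w + (i * sf + dx)) 0]
            else block) block) []) occ uaw inv mv
      = block_is_wall
        ((PySem.List.pyRange 0 sf 1).foldl (fun block dy =>
          block ++ (PySem.List.pyRange 0 sf 1).map (fun dx =>
            PySem.List.pyGetD data ((j * sf + dy) * w + (i * sf + dx)) 0)) []) occ uaw inv mv := by
        exact congrArg (fun bl => block_is_wall bl occ uaw inv mv)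
          (PySem.List.foldl_congr_mem _ _ _ _ (fun acc dy hdy => hstep acc dy hdy))
    _ = block_is_wall
        ([] ++ (PySem.List.pyRange 0 sf 1).flatMap (fun dy =>
          (PySem.List.pyRange 0 sf 1).map (fun dx =>
            PySem.List.pyGetD data ((j * sf + dy) * w + (i * sf + dx)) 0))) occ uaw inv mv :=
        congrArg (fun bl => block_is_wall bl occ uaw inv mv)
          (PySem.List.foldl_append_eq_flatMap _ _ _)
    _ = _ := by
        rw [block_is_wall_eq_any]
        simp [List.any_flatMap, List.any_map, Function.comp_def]

-- the flat pixel scan restricted to block (i, j) is exactly the dy/dx double scan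
theorem anyPix (w : Int) (data : List Int) (sf occ : Int) (uaw inv : Bool) (mv : Int)
    (nw nh i j : Int) (hsf : 0 < sf) (hi1 : 0 ≤ i) (hi2 : i < nw) (hj1 : 0 ≤ j) (hj2 : j < nh) :
    (PySem.List.pyRange 0 (nh * sf) 1).any (fun y =>
      (PySem.List.pyRange 0 (nw * sf) 1).any (fun x =>
        pixTest occ uaw inv mv (PySem.List.pyGetD data (y * w + x) 0) &&
          decide (PySem.Int.floordiv y sf * nw + PySem.Int.floordiv x sf = j * nw + i)))
    = (PySem.List.pyRange 0 sf 1).any (fun dy =>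
        (PySem.List.pyRange 0 sf 1).any (fun dx =>
          pixTest occ uaw inv mv (PySem.List.pyGetD data ((j * sf + dy) * w + (i * sf + dx)) 0))) := by
  have hnw : 0 < nw := by omega
  rw [Bool.eq_iff_iff]
  simp only [List.any_eq_true, PySem.List.mem_pyRange_one, Bool.and_eq_true, decide_eq_true_eq]
  constructor
  · rintro ⟨y, ⟨hy0, hyP⟩, x, ⟨hx0, hxQ⟩, hc, heq⟩
    have hfy1 : 0 ≤ PySem.Int.floordiv y sf := by
      rw [PySem.Int.le_floordiv_iff_mul_le hsf]; linarith
    have hfy2 : PySem.Int.floordiv y sf < nh := by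
      rw [PySem.Int.floordiv_lt_iff_lt_mul hsf]; linarith
    have hfx1 : 0 ≤ PySem.Int.floordiv x sf := by
      rw [PySem.Int.le_floordiv_iff_mul_le hsf]; linarith
    have hfx2 : PySem.Int.floordiv x sf < nw := by
      rw [PySem.Int.floordiv_lt_iff_lt_mul hsf]; linarith
    obtain ⟨hyj, hxi⟩ := quot_unique nw _ _ _ _ hfx1 hfx2 hi1 hi2 heq
    have hyb := (PySem.Int.floordiv_eq_iff_of_pos hsf).mp hyj
    have hxb := (PySem.Int.floordiv_eq_iff_of_pos hsf).mp hxi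
    refine ⟨y - j * sf, ⟨by linarith [hyb.1], by linarith [hyb.2]⟩,
            x - i * sf, ⟨by linarith [hxb.1], by linarith [hxb.2]⟩, ?_⟩
    have e1 : j * sf + (y - j * sf) = y := by ring
    have e2 : i * sf + (x - i * sf) = x := by ring
    rw [e1, e2]; exact hc
  · rintro ⟨dy, ⟨hdy0, hdy⟩, dx, ⟨hdx0, hdx⟩, hc⟩
    have hj3 : (j + 1) * sf ≤ nh * sf := mul_le_mul_of_nonneg_right (by omega) (le_of_lt hsf)
    have hi3 : (i + 1) * sf ≤ nw * sf := mul_le_mul_of_nonneg_right (by omega) (le_of_lt hsf)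
    have hy2 : j * sf + dy < nh * sf := by nlinarith
    have hx2 : i * sf + dx < nw * sf := by nlinarith
    have hfy : PySem.Int.floordiv (j * sf + dy) sf = j := by
      rw [PySem.Int.floordiv_eq_iff_of_pos hsf]
      constructor
      · linarith
      · nlinarith
    have hfx : PySem.Int.floordiv (i * sf + dx) sf = i := by
      rw [PySem.Int.floordiv_eq_iff_of_pos hsf]
      constructor
      · linarith
      · nlinarith
    exact ⟨j * sf + dy, ⟨by have := mul_nonneg hj1 (le_of_lt hsf); linarith, hy2⟩,
      i * sf + dx, ⟨by have := mul_nonneg hi1 (le_of_lt hsf); linarith, hx2⟩, hc,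
      by rw [hfy, hfx]⟩

theorem scale_down_grid_spec : Claim_equal_scale_down_grid := by
  intro w h_ data sf occ uaw inv mv _hDom hPre
  obtain ⟨hsf, _hPre2⟩ := hPre
  unfold Spec_scale_down_grid
  simp only [scale_down_grid, scale_down_grid_alt]
  by_cases hpos : 0 < PySem.Int.floordiv w sf ∧ 0 < PySem.Int.floordiv h_ sf
  · rw [if_pos hpos]
    obtain ⟨hpw, hph⟩ := hpos
    rcases lt_or_gt_of_ne hsf with hneg | hposf
    · -- sf < 0 : every block is empty and no pixel is scanned; everything is free
      have hrsf : PySem.List.pyRange 0 sf 1 = [] := PySem.List.pyRange_one_eq_nil (by omega)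
      have hrow : PySem.List.pyRange 0 (PySem.Int.floordiv h_ sf * sf) 1 = [] := by
        apply PySem.List.pyRange_one_eq_nil
        nlinarith
      simp [hrsf, hrow, block_is_wall, pyGetD_replicate_false]
    · -- sf > 0 : the main case
      have hw : PySem.Int.floordiv w sf * sf ≤ w :=
        ((PySem.Int.floordiv_eq_iff_of_pos hposf).mp rfl).1
      have hh : PySem.Int.floordiv h_ sf * sf ≤ h_ :=
        ((PySem.Int.floordiv_eq_iff_of_pos hposf).mp rfl).1
      refine congrArg _ (congrArg _ ?_)
      rw [Prod.mk.eta]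
      apply PySem.List.foldl_congr_mem
      intro st j hj
      apply PySem.List.foldl_congr_mem
      intro st2 i hi
      rw [PySem.List.mem_pyRange_one] at hj hi
      have hGb : ∀ y ∈ PySem.List.pyRange 0 (PySem.Int.floordiv h_ sf * sf) 1,
          ∀ x ∈ PySem.List.pyRange 0 (PySem.Int.floordiv w sf * sf) 1,
          0 ≤ PySem.Int.floordiv y sf * PySem.Int.floordiv w sf + PySem.Int.floordiv x sf ∧
          PySem.Int.floordiv y sf * PySem.Int.floordiv w sf + PySem.Int.floordiv x sf <
            ((List.replicate (PySem.Int.floordiv w sf * PySem.Int.floordiv h_ sf).toNat false).length : Int) := by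
        intro y hy x hx
        rw [PySem.List.mem_pyRange_one] at hy hx
        have hfy1 : 0 ≤ PySem.Int.floordiv y sf := by
          rw [PySem.Int.le_floordiv_iff_mul_le hposf]; linarith
        have hfy2 : PySem.Int.floordiv y sf < PySem.Int.floordiv h_ sf := by
          rw [PySem.Int.floordiv_lt_iff_lt_mul hposf]; linarith
        have hfx1 : 0 ≤ PySem.Int.floordiv x sf := by
          rw [PySem.Int.le_floordiv_iff_mul_le hposf]; linarith
        have hfx2 : PySem.Int.floordiv x sf < PySem.Int.floordiv w sf := by
          rw [PySem.Int.floordiv_lt_iff_lt_mul hposf]; linarith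
        have hlenr : ((List.replicate (PySem.Int.floordiv w sf * PySem.Int.floordiv h_ sf).toNat false).length : Int)
            = PySem.Int.floordiv w sf * PySem.Int.floordiv h_ sf := by
          rw [List.length_replicate]
          exact Int.toNat_of_nonneg (by positivity)
        rw [hlenr]
        constructor
        · have h0 := mul_nonneg hfy1 (le_of_lt hpw)
          omega
        · nlinarith
      have hknn : (0 : Int) ≤ j * PySem.Int.floordiv w sf + i := by
        have h0 := mul_nonneg hj.1 (le_of_lt hpw)
        omega
      rw [mark_outer _ _ _ _ _ _ hknn hGb, pyGetD_replicate_false, Bool.false_or]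
      rw [A_block w h_ data sf occ uaw inv mv (PySem.Int.floordiv w sf) (PySem.Int.floordiv h_ sf)
        i j hposf hi.1 hi.2 hj.1 hj.2 hw hh]
      rw [← anyPix w data sf occ uaw inv mv (PySem.Int.floordiv w sf) (PySem.Int.floordiv h_ sf)
        i j hposf hi.1 hi.2 hj.1 hj.2]
      rfl
  · rw [if_neg hpos]
    rcases not_and_or.mp hpos with hnw | hnh
    · have hr : PySem.List.pyRange 0 (PySem.Int.floordiv w sf) 1 = [] :=
        PySem.List.pyRange_one_eq_nil (by omega)
      simp [hr, PySem.List.foldl_ignore]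
    · have hr : PySem.List.pyRange 0 (PySem.Int.floordiv h_ sf) 1 = [] :=
        PySem.List.pyRange_one_eq_nil (by omega)
      simp [hr]
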